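-- pv_equiv track=rewrite | github.com/Ylidka/Rosalind | Ba1i_2.py | CreateMismatches
-- ===== SOURCE A (Python) =====
-- def CreateMismatches(swap_list):
--
-- 	nucleotides = 'ACGT'
-- 	mismatch_list = []
--
-- 	swap = lambda string, ch, i: string[:index]+ch+string[index+1:]
--
-- 	if len(swap_list[0][1]) > 1:
-- 		for kmer, indicies in swap_list:
-- 			index = indicies[0]
--
-- 			for nuc in filter(lambda n: n != kmer[index], nucleotides):
-- 				mismatch_list.append([swap(kmer, nuc, index), indicies[1:]])
--
-- 		return CreateMismatches(mismatch_list)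
--
-- 	else:
-- 		for kmer, [index] in swap_list:
-- 			#for nuc in [nuc for nuc in nucleotides if nuc != kmer[index]]:
-- 			for nuc in filter(lambda n: n != kmer[index], nucleotides):
-- 				mismatch_list.append(swap(kmer, nuc, index))
--
-- 		return mismatch_list
-- ===== SOURCE B (Python) =====
-- def CreateMismatches(swap_list):
--     nucleotides = 'ACGT'
--     out = []
--     for kmer, indices in swap_list:
--         variants = [kmer]
--         for idx in indices:
--             variants = [s[:idx] + n + s[idx + 1:]
--                         for s in variants
--                         for n in nucleotides if n != s[idx]]
--         out.extend(variants)
--     return out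
-- ===== Notes on version B (the rewrite author's own statement) =====
-- stated objective: simpler
-- what changed: A expands one index level at a time across ALL pairs, recursing on a rebuilt global worklist of [string, remaining-indices] items; B does a single per-pair left fold that expands each k-mer through all of its indices before moving to the next pair, with no recursion and no worklist rebuilding.
import Mathlib
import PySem

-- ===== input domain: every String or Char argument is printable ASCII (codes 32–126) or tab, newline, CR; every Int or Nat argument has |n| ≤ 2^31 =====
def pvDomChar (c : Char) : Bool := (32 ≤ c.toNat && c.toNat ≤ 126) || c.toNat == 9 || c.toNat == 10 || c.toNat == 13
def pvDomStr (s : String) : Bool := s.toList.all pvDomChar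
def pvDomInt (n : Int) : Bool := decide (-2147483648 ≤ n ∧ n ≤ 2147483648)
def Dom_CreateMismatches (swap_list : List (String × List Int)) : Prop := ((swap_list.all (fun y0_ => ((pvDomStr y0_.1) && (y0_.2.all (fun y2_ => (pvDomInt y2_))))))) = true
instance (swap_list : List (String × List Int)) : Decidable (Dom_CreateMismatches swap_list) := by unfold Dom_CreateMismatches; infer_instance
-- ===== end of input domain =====

-- B replaces A's column-wise recursion (one index level at a time across ALL pairs, carrying
-- [string, remaining-indices] work items) by a per-pair iterative fold that expands each k-mer
-- through all of its indices before moving to the next pair; objective: simpler.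

-- shared helper: the swap expression  string[:index] + ch + string[index+1:]  appearing verbatim
-- in both Python sources (exact via PySem.Str.slice, including negative indices)
def pySwap (s : String) (ch : Char) (i : Int) : String :=
  PySem.Str.slice s none (some i) ++ String.singleton ch ++ PySem.Str.slice s (some (i + 1)) none

-- the string 'ACGT' iterated character by character (both sources)
def pyNucs : List Char := ['A', 'C', 'G', 'T']

-- ===== PORT A =====
-- A recurses with the first index of every pair consumed; the recursion depth is the length of
-- swap_list[0][1], passed as fuel (the 0-fuel branch is unreachable on admitted inputs).
def CreateMismatchesFuel (fuel : Nat) (swap_list : List (String × List Int)) : List String :=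
  -- len(swap_list[0][1]); swap_list = [] raises IndexError in Python (outside Pre_)
  let firstLen : Nat := match swap_list with | [] => 0 | p :: _ => p.2.length
  if 1 < firstLen then
    match fuel with
    | 0 => []
    | f + 1 =>
      let mismatch_list : List (String × List Int) :=
        swap_list.foldl (fun acc p =>
          let index := PySem.List.pyGetD p.2 0 0   -- indicies[0]; kmer[index] raises outside Pre_
          (pyNucs.filter (fun n => !(some n == PySem.Str.pyGet? p.1 index))).foldl
            (fun a nuc => a ++ [(pySwap p.1 nuc index, PySem.List.slice p.2 (some 1) none)]) acc) []
      CreateMismatchesFuel f mismatch_list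
  else
    swap_list.foldl (fun acc p =>
      match p.2 with
      | [index] =>
        (pyNucs.filter (fun n => !(some n == PySem.Str.pyGet? p.1 index))).foldl
          (fun a nuc => a ++ [pySwap p.1 nuc index]) acc
      | _ => acc) []    -- Python raises ValueError unpacking [index] here (outside Pre_)

def CreateMismatches (swap_list : List (String × List Int)) : List String :=
  CreateMismatchesFuel (match swap_list with | [] => 0 | p :: _ => p.2.length) swap_list

-- ===== PORT B =====
-- [s[:idx]+n+s[idx+1:] for n in 'ACGT' if n != s[idx]]  for one string s
def pyExpand1 (s : String) (idx : Int) : List String :=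
  (pyNucs.filter (fun n => !(some n == PySem.Str.pyGet? s idx))).map (fun n => pySwap s n idx)

-- variants = [s[:idx]+n+s[idx+1:] for s in variants for n in 'ACGT' if n != s[idx]]
def CreateMismatchesStep (variants : List String) (idx : Int) : List String :=
  variants.flatMap (fun s => pyExpand1 s idx)

def CreateMismatchesPair (kmer : String) (indices : List Int) : List String :=
  indices.foldl CreateMismatchesStep [kmer]

def CreateMismatches_alt (swap_list : List (String × List Int)) : List String :=
  swap_list.foldl (fun out p => out ++ CreateMismatchesPair p.1 p.2) []

-- ===== PRECONDITION & SPEC =====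
-- Pre_ admits the inputs where A returns: a nonempty list whose index lists all share one positive
-- length, with every index Python-in-range of its own k-mer; the only narrowing is that rangehood
-- is checked against the ORIGINAL k-mer length, excluding the corner where an index is in range
-- only after an earlier swap at -1 has doubled the string length (both programs agree there, but
-- rangehood then depends on run-time growth and is not closed-form; see claim cites).
def Pre_CreateMismatches (swap_list : List (String × List Int)) : Prop :=
  swap_list ≠ [] ∧ 0 < swap_list.headI.2.length ∧
  ∀ p ∈ swap_list, p.2.length = swap_list.headI.2.length ∧
    ∀ i ∈ p.2, PySem.Raise.InRange p.1.toList.length i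

instance (swap_list : List (String × List Int)) : Decidable (Pre_CreateMismatches swap_list) := by
  unfold Pre_CreateMismatches; infer_instance

def pvWitness_CreateMismatches : (List (String × List Int)) := [("AC", [0, 1]), ("GT", [-2, 1])]

def Spec_CreateMismatches (swap_list : List (String × List Int)) (out : List String) : Prop := out = CreateMismatches_alt swap_list
instance (swap_list : List (String × List Int)) (out : List String) : Decidable (Spec_CreateMismatches swap_list out) := by unfold Spec_CreateMismatches; infer_instance

-- ===== CLAIM (what is proved, stated in full; the proofs are below) =====
def Claim_equal_CreateMismatches : Prop := ∀ (swap_list : List (String × List Int)), Dom_CreateMismatches swap_list → Pre_CreateMismatches swap_list → Spec_CreateMismatches swap_list (CreateMismatches swap_list)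

-- ===== LEMMAS AND PROOFS =====


-- B's fold from a list of seed strings is the concatenation of the folds from each seed
theorem foldl_step_flatMap (rest : List Int) :
    ∀ (xs : List String),
      rest.foldl CreateMismatchesStep xs = xs.flatMap (fun s => CreateMismatchesPair s rest) := by
  induction rest with
  | nil => intro xs; simp [CreateMismatchesPair]
  | cons i r ih =>
    intro xs
    show r.foldl CreateMismatchesStep (CreateMismatchesStep xs i) = _
    rw [ih, CreateMismatchesStep, List.flatMap_assoc]
    refine List.flatMap_congr (fun s _ => ?_)
    have h : CreateMismatchesPair s (i :: r)
        = r.foldl CreateMismatchesStep (CreateMismatchesStep [s] i) := rfl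
    rw [h, ih]
    simp [CreateMismatchesStep]

-- B on one pair, first index peeled off
theorem pairStep (kmer : String) (i : Int) (rest : List Int) :
    CreateMismatchesPair kmer (i :: rest)
      = (pyExpand1 kmer i).flatMap (fun s => CreateMismatchesPair s rest) := by
  have h : CreateMismatchesPair kmer (i :: rest)
      = rest.foldl CreateMismatchesStep (CreateMismatchesStep [kmer] i) := rfl
  rw [h, foldl_step_flatMap]
  simp [CreateMismatchesStep]

-- one level of A's recursion equals peeling the first index of every pair, by induction on the
-- shared index-list length (= the fuel)
theorem levels :
    ∀ (L : Nat), 0 < L → ∀ (items : List (String × List Int)),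
      (∀ p ∈ items, p.2.length = L) →
      CreateMismatchesFuel L items = items.flatMap (fun p => CreateMismatchesPair p.1 p.2) := by
  intro L
  induction L with
  | zero => omega
  | succ m ih =>
    intro _ items hlen
    cases items with
    | nil => simp [CreateMismatchesFuel]
    | cons p0 rest =>
      by_cases hm : m = 0
      · -- base level: every index list is a singleton
        subst hm
        have h1 : p0.2.length = 1 := hlen p0 (by simp)
        rw [CreateMismatchesFuel]
        simp only [h1, show ¬ (1 < 1) by omega, reduceIte]
        rw [PySem.List.foldl_congr_mem (p0 :: rest) _
            (fun acc p => acc ++ (match p.2 with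
              | [index] => pyExpand1 p.1 index
              | _ => [])) []
            (by
              intro acc p hp
              have := hlen p hp
              match p, this with
              | (k, [idx]), _ =>
                simp only [pyExpand1]
                rw [PySem.List.foldl_append_singleton_eq_map]),
          PySem.List.foldl_append_eq_flatMap]
        rw [List.nil_append]
        refine List.flatMap_congr (fun p hp => ?_)
        have := hlen p hp
        match p, this with
        | (k, [idx]), _ =>
          simp [CreateMismatchesPair, CreateMismatchesStep]
      · -- recursive level
        have hm1 : 1 < m + 1 := by omega
        have h0 : p0.2.length = m + 1 := hlen p0 (by simp)
        rw [CreateMismatchesFuel]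
        simp only [h0, hm1, if_pos]
        rw [PySem.List.foldl_congr_mem (p0 :: rest) _
            (fun acc p => acc ++ ((pyExpand1 p.1 (PySem.List.pyGetD p.2 0 0)).map
              (fun s => (s, p.2.tail)))) []
            (by
              intro acc p hp
              have hl := hlen p hp
              match p, hl with
              | (k, idx :: is'), _ =>
                simp only [pyExpand1, List.map_map, PySem.List.slice_from_one,
                  PySem.List.pyGetD_zero_cons, List.tail_cons]
                rw [PySem.List.foldl_append_singleton_eq_map]
                rfl),
          PySem.List.foldl_append_eq_flatMap, List.nil_append]
        rw [ih (by omega) _ (by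
          intro q hq
          simp only [List.mem_flatMap, List.mem_map] at hq
          obtain ⟨p, hp, s, _, rfl⟩ := hq
          have hl := hlen p hp
          simp [hl]), List.flatMap_assoc]
        refine List.flatMap_congr (fun p hp => ?_)
        have hl := hlen p hp
        match p, hl with
        | (k, idx :: is'), _ =>
          rw [pairStep]
          simp [List.flatMap_map]

-- ===== VERDICT (by name: the statement is the Claim_ definition above) =====
theorem CreateMismatches_spec : Claim_equal_CreateMismatches := by
  intro sl _ hPre
  cases sl with
  | nil => exact absurd hPre.1 (by simp)
  | cons p0 rest =>
    obtain ⟨-, hpos, hall⟩ := hPre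
    simp only [List.headI_cons] at hpos hall
    show CreateMismatches (p0 :: rest) = CreateMismatches_alt (p0 :: rest)
    have hA : CreateMismatches (p0 :: rest) = CreateMismatchesFuel p0.2.length (p0 :: rest) := rfl
    rw [hA, levels p0.2.length hpos _ (fun p hp => (hall p hp).1),
      CreateMismatches_alt, PySem.List.foldl_append_eq_flatMap, List.nil_append]
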